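-- pv_equiv track=rewrite | github.com/iojeda1/TheoryProject1 | DPLLPabloClass.py | format_assignment
-- ===== SOURCE A (Python) =====
-- def format_assignment(assignment, num_vars):
--     result = []
--     for i in range(1, num_vars + 1):
--         if i in assignment:
--             result.append('1')
--         elif -i in assignment:
--             result.append('0')
--         else:
--             result.append('0')  # Default to 0 if unassigned
--     return ','.join(result)
-- ===== SOURCE B (Python) =====
-- def format_assignment(assignment, num_vars):
--     result = ['0'] * num_vars
--     for v in assignment:
--         if 1 <= v <= num_vars:
--             result[v - 1] = '1'
--     return ','.join(result)
-- ===== Notes on version B (the rewrite author's own statement) =====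
-- stated objective: alternative
-- what changed: B replaces A's per-variable membership scan over range(1, num_vars+1) with a single scatter pass over the assignment into a preallocated ['0']*num_vars buffer, then joins.
import Mathlib
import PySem

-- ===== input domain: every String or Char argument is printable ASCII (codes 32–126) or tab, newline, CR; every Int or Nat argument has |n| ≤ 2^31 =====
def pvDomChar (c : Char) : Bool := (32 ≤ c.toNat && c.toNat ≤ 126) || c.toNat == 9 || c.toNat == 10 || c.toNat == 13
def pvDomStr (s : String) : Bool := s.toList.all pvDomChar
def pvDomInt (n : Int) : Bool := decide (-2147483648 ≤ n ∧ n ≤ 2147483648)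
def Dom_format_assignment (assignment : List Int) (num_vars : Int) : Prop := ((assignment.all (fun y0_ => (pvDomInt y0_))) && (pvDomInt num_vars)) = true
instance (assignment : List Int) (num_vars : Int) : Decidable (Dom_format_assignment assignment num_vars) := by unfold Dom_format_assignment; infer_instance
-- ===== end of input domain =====

-- B replaces A's per-variable membership scan over range(1, num_vars+1) with one scatter
-- pass over the assignment into a preallocated '0' buffer; same return value everywhere.

-- ===== PORT A =====
def format_assignment (assignment : List Int) (num_vars : Int) : String :=
  PySem.Str.join ","
    ((PySem.List.pyRange 1 (num_vars + 1) 1).foldl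
      (fun r i =>
        if assignment.contains i then r ++ ["1"]
        else if assignment.contains (-i) then r ++ ["0"]
        else r ++ ["0"]) [])

-- ===== PORT B =====
def format_assignment_alt (assignment : List Int) (num_vars : Int) : String :=
  PySem.Str.join ","
    (assignment.foldl
      (fun r v => if 1 ≤ v ∧ v ≤ num_vars then r.set (v - 1).toNat "1" else r)
      (List.replicate num_vars.toNat "0"))

-- ===== PRECONDITION & SPEC =====
def Spec_format_assignment (assignment : List Int) (num_vars : Int) (out : String) : Prop := out = format_assignment_alt assignment num_vars
instance (assignment : List Int) (num_vars : Int) (out : String) : Decidable (Spec_format_assignment assignment num_vars out) := by unfold Spec_format_assignment; infer_instance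

-- ===== CLAIM (what is proved, stated in full; the proofs are below) =====
def Claim_equal_format_assignment : Prop := ∀ (assignment : List Int) (num_vars : Int), Dom_format_assignment assignment num_vars → Spec_format_assignment assignment num_vars (format_assignment assignment num_vars)

-- ===== LEMMAS AND PROOFS =====

-- the scatter loop of B, named for the lemmas below
def pvScatter (assignment : List Int) (num_vars : Int) (base : List String) : List String :=
  assignment.foldl
    (fun r v => if 1 ≤ v ∧ v ≤ num_vars then r.set (v - 1).toNat "1" else r) base

theorem pvScatter_length (l : List Int) (n : Int) (base : List String) :
    (pvScatter l n base).length = base.length := by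
  induction l generalizing base with
  | nil => rfl
  | cons v l ih =>
    simp only [pvScatter, List.foldl_cons] at ih ⊢
    split_ifs with h
    · rw [ih]; simp
    · exact ih base

theorem pvScatter_getElem (l : List Int) (n : Int) (base : List String)
    (j : Nat) (hj : j < base.length) (hn : n.toNat ≤ base.length) :
    (pvScatter l n base)[j]'(by rw [pvScatter_length]; exact hj) =
      if ((j : Int) + 1 ∈ l ∧ (j : Int) + 1 ≤ n) then "1" else base[j] := by
  induction l generalizing base with
  | nil => simp [pvScatter]
  | cons v l ih =>
    by_cases hv : 1 ≤ v ∧ v ≤ n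
    · have hred : pvScatter (v :: l) n base = pvScatter l n (base.set (v - 1).toNat "1") := by
        simp only [pvScatter, List.foldl_cons, if_pos hv]
      have hb' : (base.set (v - 1).toNat "1").length = base.length := by simp
      have key := ih (base.set (v - 1).toNat "1") (by omega) (by omega)
      simp only [hred, key]
      by_cases hveq : v = (j : Int) + 1
      · have hidx : (v - 1).toNat = j := by omega
        have hle : (j : Int) + 1 ≤ n := by omega
        simp [hveq, hle]
      · have hidx : (v - 1).toNat ≠ j := by omega
        rw [List.getElem_set_ne hidx]
        by_cases hmem : (j : Int) + 1 ∈ l ∧ (j : Int) + 1 ≤ n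
        · rw [if_pos hmem, if_pos ⟨List.mem_cons_of_mem _ hmem.1, hmem.2⟩]
        · rw [if_neg hmem, if_neg]
          rintro ⟨hm, hle⟩
          rcases List.mem_cons.mp hm with h | h
          · exact hveq h.symm
          · exact hmem ⟨h, hle⟩
    · have hred : pvScatter (v :: l) n base = pvScatter l n base := by
        simp only [pvScatter, List.foldl_cons, if_neg hv]
      rw [List.getElem_of_eq hred, ih base hj hn]
      by_cases hmem : (j : Int) + 1 ∈ l ∧ (j : Int) + 1 ≤ n
      · rw [if_pos hmem, if_pos ⟨List.mem_cons_of_mem _ hmem.1, hmem.2⟩]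
      · rw [if_neg hmem, if_neg]
        rintro ⟨hm, hle⟩
        rcases List.mem_cons.mp hm with h | h
        · exact hv ⟨by omega, by omega⟩
        · exact hmem ⟨h, hle⟩

theorem pvLists_eq (assignment : List Int) (num_vars : Int) :
    pvScatter assignment num_vars (List.replicate num_vars.toNat "0") =
      (List.range num_vars.toNat).map
        (fun k : Nat => if assignment.contains ((k : Int) + 1) then "1" else "0") := by
  apply List.ext_getElem
  · simp [pvScatter_length]
  · intro j h1 h2
    have hj : j < num_vars.toNat := by simpa [pvScatter_length] using h1
    rw [pvScatter_getElem assignment num_vars _ j (by simpa using hj) (by simp)]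
    simp only [List.getElem_map, List.getElem_range, List.getElem_replicate]
    by_cases hmem : (j : Int) + 1 ∈ assignment
    · have hle : (j : Int) + 1 ≤ num_vars := by omega
      simp [hmem, hle]
    · simp [hmem]

theorem pvA_list_eq (assignment : List Int) (num_vars : Int) :
    (PySem.List.pyRange 1 (num_vars + 1) 1).foldl
      (fun r i =>
        if assignment.contains i then r ++ ["1"]
        else if assignment.contains (-i) then r ++ ["0"]
        else r ++ ["0"]) [] =
      (List.range num_vars.toNat).map
        (fun k : Nat => if assignment.contains ((k : Int) + 1) then "1" else "0") := by
  have hfun : (fun (r : List String) (i : Int) =>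
      if assignment.contains i then r ++ ["1"]
      else if assignment.contains (-i) then r ++ ["0"]
      else r ++ ["0"]) =
      (fun r i => r ++ [if assignment.contains i then "1" else "0"]) := by
    funext r i
    split_ifs <;> rfl
  rw [hfun, PySem.List.foldl_append_singleton_eq_map, PySem.List.pyRange_one]
  have h1 : (num_vars + 1 - 1).toNat = num_vars.toNat := by omega
  rw [h1, List.map_map]
  apply List.map_congr_left
  intro k _
  simp [add_comm]

-- ===== VERDICT (by name: the statement is the Claim_ definition above) =====
theorem format_assignment_spec : Claim_equal_format_assignment := by
  intro assignment num_vars _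
  unfold Spec_format_assignment format_assignment format_assignment_alt
  have hb := pvLists_eq assignment num_vars
  simp only [pvScatter] at hb
  rw [pvA_list_eq, hb]
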